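-- pv_equiv track=rewrite | github.com/SankeerthTella/InvertedIndex | stella3_project2.py | merge_or
-- ===== SOURCE A (Python) =====
-- def merge_or(result,b):
--     temp=[]
--     temp=list(set(result) | set(b))
--     temp.sort()
--     size_1 = len(result)
--     size_2 = len(b)
--     comp=0
--     i, j = 0, 0
--     while i < size_1 and j < size_2:
--         if result[i] == b[j]:
--             i+=1
--             j+=1
--             comp+=1
--         elif result[i]>b[j]:
--             j+=1
--             comp+=1
--         else:
--             i+=1
--             comp+=1
--
--     return temp,comp
-- ===== SOURCE B (Python) =====
-- def merge_or(result, b):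
--     # union: sort the concatenation once, then drop adjacent duplicates
--     temp = []
--     for x in sorted(result + b):
--         if not temp or temp[-1] != x:
--             temp.append(x)
--     # comparison count: consume the two sequences head-first via stacks
--     xs = result[::-1]
--     ys = b[::-1]
--     comp = 0
--     while xs and ys:
--         if xs[-1] == ys[-1]:
--             xs.pop()
--             ys.pop()
--         elif xs[-1] > ys[-1]:
--             ys.pop()
--         else:
--             xs.pop()
--         comp += 1
--     return temp, comp
-- ===== Notes on version B (the rewrite author's own statement) =====
-- stated objective: alternative
-- what changed: B builds the sorted union by sorting the concatenation once and dropping adjacent duplicates (instead of hashing two sets, taking their union and sorting), and counts the merge comparisons by consuming the two sequences head-first from stacks instead of A's two-index while loop.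
import Mathlib
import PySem

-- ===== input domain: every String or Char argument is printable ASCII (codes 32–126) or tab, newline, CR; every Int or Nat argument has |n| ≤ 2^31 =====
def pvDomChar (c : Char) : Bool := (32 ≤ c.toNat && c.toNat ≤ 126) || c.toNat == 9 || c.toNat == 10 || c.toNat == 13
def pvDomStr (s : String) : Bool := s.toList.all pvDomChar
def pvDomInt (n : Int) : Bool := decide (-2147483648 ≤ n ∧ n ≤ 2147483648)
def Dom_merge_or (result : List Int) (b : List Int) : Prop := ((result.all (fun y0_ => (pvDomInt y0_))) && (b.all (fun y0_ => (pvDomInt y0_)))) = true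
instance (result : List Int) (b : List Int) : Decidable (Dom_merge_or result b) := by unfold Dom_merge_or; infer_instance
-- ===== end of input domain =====

-- B computes the sorted union by sorting the concatenation once and dropping adjacent
-- duplicates, and counts the merge comparisons by consuming the two lists head-first
-- (objective: alternative decomposition; same asymptotic cost).

-- ===== PORT A =====
-- A's while loop over indices i, j with the running comparison counter
-- (fuel makes the recursion structural; each step advances i or j, so
-- result.length + b.length steps always suffice — proved in loopA_eq below).
def mergeOrLoopA (result b : List Int) : Nat → Nat → Nat → Int → Int
  | 0, _, _, comp => comp
  | fuel + 1, i, j, comp =>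
    if h : i < result.length ∧ j < b.length then
      -- result[i], b[j]: in range by the loop guard
      if result[i] = b[j] then mergeOrLoopA result b fuel (i+1) (j+1) (comp+1)
      else if result[i] > b[j] then mergeOrLoopA result b fuel i (j+1) (comp+1)
      else mergeOrLoopA result b fuel (i+1) j (comp+1)
    else comp

def merge_or (result : List Int) (b : List Int) : List Int × Int :=
  -- temp = list(set(result) | set(b)); temp.sort()  (set order consumed only by the key-less sort)
  let temp := PySem.List.sorted (PySem.Set.union (PySem.Set.ofList result) b) (fun x => x) false
  let comp := mergeOrLoopA result b (result.length + b.length) 0 0 0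
  (temp, comp)

-- ===== PORT B =====
-- 'if not temp or temp[-1] != x: temp.append(x)'
def dedupStep (acc : List Int) (x : Int) : List Int :=
  if acc = [] ∨ PySem.List.pyGetD acc (-1) 0 ≠ x then acc ++ [x] else acc

-- the while loop popping from the two reversed stacks = consuming the lists head-first
-- (fuel for structural recursion; every step pops at least one element)
def compB (result b : List Int) : Nat → List Int → List Int → Int
  | 0, _, _ => 0
  | _ + 1, [], _ => 0
  | _ + 1, _ :: _, [] => 0
  | fuel + 1, x :: xs, y :: ys =>
    (if x = y then compB result b fuel xs ys
     else if x > y then compB result b fuel (x :: xs) ys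
     else compB result b fuel xs (y :: ys)) + 1

def merge_or_alt (result : List Int) (b : List Int) : List Int × Int :=
  let temp := (PySem.List.sorted (result ++ b) (fun x => x) false).foldl dedupStep []
  (temp, compB result b (result.length + b.length) result b)

-- ===== PRECONDITION & SPEC =====
def Spec_merge_or (result : List Int) (b : List Int) (out : List Int × Int) : Prop := out = merge_or_alt result b
instance (result : List Int) (b : List Int) (out : List Int × Int) : Decidable (Spec_merge_or result b out) := by unfold Spec_merge_or; infer_instance

-- ===== CLAIM (what is proved, stated in full; the proofs are below) =====
def Claim_equal_merge_or : Prop := ∀ (result : List Int) (b : List Int), Dom_merge_or result b → Spec_merge_or result b (merge_or result b)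

-- ===== LEMMAS AND PROOFS =====

-- reference comparison counter (proof-side only), by well-founded recursion
def compR : List Int → List Int → Int
  | [], _ => 0
  | _ :: _, [] => 0
  | x :: xs, y :: ys =>
    (if x = y then compR xs ys
     else if x > y then compR (x :: xs) ys
     else compR xs (y :: ys)) + 1
termination_by xs ys => xs.length + ys.length
decreasing_by all_goals first | (simp; omega) | simp

-- A's fueled index loop computes the reference counter once the fuel covers the remaining work
theorem loopA_eq (result b : List Int) :
    ∀ (fuel i j : Nat) (comp : Int),
      (result.length - i) + (b.length - j) ≤ fuel →
      mergeOrLoopA result b fuel i j comp = comp + compR (result.drop i) (b.drop j) := by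
  intro fuel
  induction fuel with
  | zero =>
    intro i j comp hle
    have hi : result.length ≤ i := by omega
    rw [mergeOrLoopA, List.drop_eq_nil_of_le hi, compR]
    omega
  | succ fuel ih =>
    intro i j comp hle
    rw [mergeOrLoopA]
    by_cases h : i < result.length ∧ j < b.length
    · rw [dif_pos h]
      rw [List.drop_eq_getElem_cons h.1, List.drop_eq_getElem_cons h.2, compR]
      by_cases heq : result[i] = b[j]
      · rw [if_pos heq, if_pos heq, ih (i+1) (j+1) (comp+1) (by omega)]
        omega
      · rw [if_neg heq, if_neg heq]
        by_cases hgt : result[i] > b[j]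
        · rw [if_pos hgt, if_pos hgt, ih i (j+1) (comp+1) (by omega),
              ← List.drop_eq_getElem_cons h.1]
          omega
        · rw [if_neg hgt, if_neg hgt, ih (i+1) j (comp+1) (by omega),
              ← List.drop_eq_getElem_cons h.2]
          omega
    · rw [dif_neg h]
      rcases Nat.lt_or_ge i result.length with hi | hi
      · have hj : b.length ≤ j := by omega
        rw [List.drop_eq_nil_of_le hj, List.drop_eq_getElem_cons hi, compR]
        omega
      · rw [List.drop_eq_nil_of_le hi, compR]
        omega

-- B's fueled head-first loop computes the reference counter once the fuel covers both lists
theorem compB_eq (result b : List Int) :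
    ∀ (fuel : Nat) (xs ys : List Int), xs.length + ys.length ≤ fuel →
      compB result b fuel xs ys = compR xs ys := by
  intro fuel
  induction fuel with
  | zero =>
    intro xs ys hle
    have hx : xs = [] := by cases xs <;> simp_all
    subst hx
    rw [compB, compR]
  | succ fuel ih =>
    intro xs ys hle
    match xs, ys with
    | [], ys => rw [compB, compR]
    | x :: xs, [] => rw [compB, compR]
    | x :: xs, y :: ys =>
      rw [compB, compR]
      simp only [List.length_cons] at hle
      by_cases heq : x = y
      · rw [if_pos heq, if_pos heq, ih xs ys (by omega)]
      · rw [if_neg heq, if_neg heq]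
        by_cases hgt : x > y
        · rw [if_pos hgt, if_pos hgt, ih (x :: xs) ys (by simp; omega)]
        · rw [if_neg hgt, if_neg hgt, ih xs (y :: ys) (by simp; omega)]

-- every element of a strictly increasing list is ≤ its last element
theorem le_getLast_of_pairwise_lt (acc : List Int) (h : acc.Pairwise (· < ·))
    (hne : acc ≠ []) : ∀ a ∈ acc, a ≤ acc.getLast hne := by
  induction acc with
  | nil => simp
  | cons x t ih =>
    intro a ha
    cases t with
    | nil => simp_all
    | cons y t' =>
      rw [List.getLast_cons (by simp)]
      have hp := List.pairwise_cons.1 h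
      have hih := ih hp.2 (by simp)
      rcases List.mem_cons.1 ha with rfl | ha'
      · have hxy : a < y := hp.1 y (by simp)
        have := hih y (by simp)
        omega
      · exact hih a ha'

-- invariant of B's dedup loop over a ≤-sorted list
theorem foldl_dedup_inv (l : List Int) : ∀ (acc : List Int),
    l.Pairwise (· ≤ ·) → acc.Pairwise (· < ·) →
    (∀ a ∈ acc, ∀ y ∈ l, a ≤ y) →
    (l.foldl dedupStep acc).Pairwise (· < ·) ∧
      (∀ x, x ∈ l.foldl dedupStep acc ↔ x ∈ acc ∨ x ∈ l) := by
  induction l with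
  | nil => intro acc _ hacc _; simpa using hacc
  | cons x l ih =>
    intro acc hl hacc hcross
    have hl' := (List.pairwise_cons.1 hl).2
    have hxle := (List.pairwise_cons.1 hl).1
    simp only [List.foldl_cons]
    by_cases hc : acc = [] ∨ PySem.List.pyGetD acc (-1) 0 ≠ x
    · have hstep : dedupStep acc x = acc ++ [x] := by simp [dedupStep, hc]
      rw [hstep]
      have hax : ∀ a ∈ acc, a < x := by
        intro a ha
        have hne : acc ≠ [] := by rintro rfl; simp at ha
        have h1 : a ≤ x := hcross a ha x (by simp)
        rcases h1.lt_or_eq with h | rfl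
        · exact h
        · exfalso
          rcases hc with h0 | hlast
          · exact hne h0
          · have hg := le_getLast_of_pairwise_lt acc hacc hne a ha
            have hg2 : acc.getLast hne ≤ a := hcross _ (List.getLast_mem hne) a (by simp)
            have : acc.getLast hne = a := le_antisymm hg2 hg
            rw [PySem.List.pyGetD_neg_one acc 0 hne] at hlast
            exact hlast this
      have hacc' : (acc ++ [x]).Pairwise (· < ·) := by
        rw [List.pairwise_append]
        exact ⟨hacc, by simp, by simpa using hax⟩
      have hcross' : ∀ a ∈ acc ++ [x], ∀ y ∈ l, a ≤ y := by
        intro a ha y hy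
        rcases List.mem_append.1 ha with ha | ha
        · exact hcross a ha y (by simp [hy])
        · simp at ha; subst ha; exact hxle y hy
      obtain ⟨h1, h2⟩ := ih (acc ++ [x]) hl' hacc' hcross'
      refine ⟨h1, fun z => ?_⟩
      rw [h2 z]; simp [or_comm, or_assoc]
      tauto
    · have hstep : dedupStep acc x = acc := by simp [dedupStep]; tauto
      rw [hstep]
      push Not at hc
      obtain ⟨hne, hlast⟩ := hc
      have hxmem : x ∈ acc := by
        rw [PySem.List.pyGetD_neg_one acc 0 hne] at hlast
        rw [← hlast]; exact List.getLast_mem hne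
      obtain ⟨h1, h2⟩ := ih acc hl' hacc (fun a ha y hy => hcross a ha y (by simp [hy]))
      refine ⟨h1, fun z => ?_⟩
      rw [h2 z]
      constructor
      · tauto
      · rintro (hz | hz)
        · exact Or.inl hz
        · rcases List.mem_cons.1 hz with rfl | hz
          · exact Or.inl hxmem
          · exact Or.inr hz

-- the two union computations agree
theorem temp_eq (result b : List Int) :
    PySem.List.sorted (PySem.Set.union (PySem.Set.ofList result) b) (fun x => x) false
      = (PySem.List.sorted (result ++ b) (fun x => x) false).foldl dedupStep [] := by
  set s := PySem.List.sorted (result ++ b) (fun x => x) false with hs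
  obtain ⟨hpair, hmem⟩ := foldl_dedup_inv s []
    (PySem.List.sorted_pairwise (result ++ b) (fun x => x)) (by simp) (by simp)
  refine (PySem.List.sorted_eq_of_perm_of_pairwise_lt _ _ _ ?_ hpair)
  have hnd : (s.foldl dedupStep []).Nodup := hpair.imp (fun hlt => ne_of_lt hlt)
  have hndu : (PySem.Set.union (PySem.Set.ofList result) b).Nodup :=
    PySem.Set.nodup_union _ _ (PySem.Set.nodup_ofList result)
  refine (List.perm_ext_iff_of_nodup hnd hndu).mpr ?_
  intro x
  rw [hmem x]
  simp only [PySem.Set.mem_union, PySem.Set.mem_ofList, List.mem_nil_iff, false_or]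
  rw [hs, PySem.List.mem_sorted]
  simp

-- ===== VERDICT (by name: the statement is the Claim_ definition above) =====
theorem merge_or_spec : Claim_equal_merge_or := by
  intro result b _
  show _ = _
  unfold merge_or merge_or_alt
  rw [temp_eq, loopA_eq result b (result.length + b.length) 0 0 0 (by omega),
      compB_eq result b (result.length + b.length) result b (by omega)]
  simp
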